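-- pv_equiv track=rewrite | github.com/rain-zhao/leetcode | py/LCP14.py | splitArray2
-- ===== SOURCE A (Python) =====
-- from typing import List
--
-- def splitArray2(nums: List[int]) -> int:
--     n = len(nums)
--
--     def gcd(a: int, b: int) -> int:
--         if b == 0:
--             return a
--         return gcd(b, a % b)
--
--     memo = {}
--
--     def dfs(i: int, j: int) -> int:
--         if i > j:
--             return 0
--         idx = i * n + j
--         if idx in memo:
--             return memo[idx]
--         if gcd(nums[i], nums[j]) > 1:
--             memo[idx] = 1
--             return 1
--         res = j - i + 1
--         for p in range(i, j):
--             res = min(res, dfs(i, p)+dfs(p+1, j))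
--         memo[idx] = res
--         return res
--     return dfs(0, n-1)
-- ===== SOURCE B (Python) =====
-- from typing import List
--
-- def splitArray2(nums: List[int]) -> int:
--     # Linear "cover" DP over prefixes: dp[j] = min segments for nums[:j];
--     # a segment [i, j-1] is usable iff it is a singleton or gcd(nums[i], nums[j-1]) > 1.
--     def gcd(a: int, b: int) -> int:
--         while b:
--             a, b = b, a % b
--         return a
--
--     n = len(nums)
--     dp = [0] * (n + 1)
--     for j in range(1, n + 1):
--         best = dp[j - 1] + 1
--         for i in range(j - 1):
--             if gcd(nums[i], nums[j - 1]) > 1: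
--                 best = min(best, dp[i] + 1)
--         dp[j] = best
--     return dp[n]
-- ===== Notes on version B (the rewrite author's own statement) =====
-- stated objective: faster
-- what changed: Replaced the O(n^3) memoized interval-splitting recursion dfs(i,j) with a one-dimensional prefix DP: dp[j] = min over valid last segments [i, j-1] (singleton or endpoint-gcd > 1) of dp[i] + 1.
import Mathlib
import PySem

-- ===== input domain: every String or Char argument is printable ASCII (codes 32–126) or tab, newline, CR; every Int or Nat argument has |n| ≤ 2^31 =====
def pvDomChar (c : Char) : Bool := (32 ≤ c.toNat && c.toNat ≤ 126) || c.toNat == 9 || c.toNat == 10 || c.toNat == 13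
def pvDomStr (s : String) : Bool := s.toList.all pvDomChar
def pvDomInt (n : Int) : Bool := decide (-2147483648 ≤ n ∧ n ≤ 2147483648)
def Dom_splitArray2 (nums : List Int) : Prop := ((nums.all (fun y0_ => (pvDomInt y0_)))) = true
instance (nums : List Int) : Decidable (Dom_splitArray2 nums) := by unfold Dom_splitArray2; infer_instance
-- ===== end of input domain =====

-- B replaces A's O(n^3) memoized interval-splitting recursion by a one-dimensional
-- prefix DP over "last segment" choices (objective: faster, asymptotic).

-- termination facts for the ports (cited by name in decreasing_by)
theorem pygcd_dec (a b : Int) (hb : ¬b = 0) : (PySem.Int.mod a b).natAbs < b.natAbs := by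
  rcases lt_or_gt_of_ne hb with h | h
  · have h2 := PySem.Int.mod_neg_bounds a h; omega
  · have h1 := PySem.Int.mod_nonneg a h; have h2 := PySem.Int.mod_lt a h; omega

theorem range_dec1 {i j : Nat} (p : {x // x ∈ List.range' i (j - i)}) : p.1 - i < j - i := by
  have := List.mem_range'_1.mp p.2; omega

theorem range_dec2 {i j : Nat} (p : {x // x ∈ List.range' i (j - i)}) :
    j - (p.1 + 1) < j - i := by
  have := List.mem_range'_1.mp p.2; omega

-- shared helper: Python's recursive `gcd` (A) = the iterative `while b:` gcd (B),
-- on Python semantics (floor mod, sign of the divisor)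
def pygcd (a b : Int) : Int :=
  if b = 0 then a else pygcd b (PySem.Int.mod a b)
termination_by b.natAbs
decreasing_by exact pygcd_dec a b (by assumption)

-- ===== PORT A =====
-- dfs(i, j) of A without the memo dict: the memo is a pure cache over (i, j)
-- (every stored value is the value the recursion returns), so the cached and the
-- plain recursion return identical values; indices are Nat (always 0 ≤ i, j < n here),
-- nums[i] is getD with an unreachable default.
def dfsA (nums : List Int) (i j : Nat) : Int :=
  if j < i then 0
  else if 1 < pygcd (nums.getD i 0) (nums.getD j 0) then 1
  else
    (List.range' i (j - i)).attach.foldl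
      (fun res p => min res (dfsA nums i p.1 + dfsA nums (p.1 + 1) j))
      ((j : Int) - (i : Int) + 1)
termination_by j - i
decreasing_by
  · exact range_dec1 p
  · exact range_dec2 p

-- the `nums = []` branch is dfs's own `i > j` base case (n = 0 makes j = -1 in Python),
-- which Nat indices cannot express
def splitArray2 (nums : List Int) : Int :=
  if nums.length = 0 then 0 else dfsA nums 0 (nums.length - 1)

-- ===== PORT B =====
def splitArray2_alt (nums : List Int) : Int :=
  let n := nums.length
  let dp :=
    (List.range' 1 n).foldl
      (fun dp j =>
        let best := dp.getD (j - 1) 0 + 1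
        let best :=
          (List.range (j - 1)).foldl
            (fun best i =>
              if 1 < pygcd (nums.getD i 0) (nums.getD (j - 1) 0) then
                min best (dp.getD i 0 + 1)
              else best)
            best
        dp.set j best)
      (List.replicate (n + 1) (0 : Int))
  dp.getD n 0

-- ===== PRECONDITION & SPEC =====
def Spec_splitArray2 (nums : List Int) (out : Int) : Prop := out = splitArray2_alt nums
instance (nums : List Int) (out : Int) : Decidable (Spec_splitArray2 nums out) := by unfold Spec_splitArray2; infer_instance

-- ===== CLAIM (what is proved, stated in full; the proofs are below) =====
def Claim_equal_splitArray2 : Prop := ∀ (nums : List Int), Dom_splitArray2 nums → Spec_splitArray2 nums (splitArray2 nums)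

-- ===== LEMMAS AND PROOFS =====

-- attach-fold = plain fold (explicit f, so `rw` can instantiate it)
theorem foldl_attach' {α β : Type} (l : List α) (f : β → α → β) (b : β) :
    l.attach.foldl (fun acc x => f acc x.1) b = l.foldl f b := List.foldl_attach ..

-- generic facts about the loop shape `res = min(res, f x)` (optionally guarded by `c x`)
theorem foldlMinIf_le_init {β : Type} (l : List β) (c : β → Bool) (f : β → Int) (init : Int) :
    l.foldl (fun acc x => if c x then min acc (f x) else acc) init ≤ init := by
  induction l generalizing init with
  | nil => simp
  | cons x t ih =>
    simp only [List.foldl_cons]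
    refine le_trans (ih _) ?_
    split
    · exact min_le_left ..
    · exact le_rfl

theorem foldlMinIf_le_mem {β : Type} (l : List β) (c : β → Bool) (f : β → Int)
    (x : β) (hc : c x = true) :
    ∀ init, x ∈ l → l.foldl (fun acc x => if c x then min acc (f x) else acc) init ≤ f x := by
  induction l with
  | nil => intro init hx; simp at hx
  | cons y t ih =>
    intro init hx
    simp only [List.foldl_cons]
    rcases List.mem_cons.mp hx with rfl | hx
    · refine le_trans (foldlMinIf_le_init ..) ?_
      rw [if_pos hc]
      exact min_le_right ..
    · exact ih _ hx

theorem foldlMinIf_ge {β : Type} (l : List β) (c : β → Bool) (f : β → Int) (v : Int) :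
    ∀ init, v ≤ init → (∀ x ∈ l, c x = true → v ≤ f x) →
      v ≤ l.foldl (fun acc x => if c x then min acc (f x) else acc) init := by
  induction l with
  | nil => intro init h0 _; simpa
  | cons y t ih =>
    intro init h0 h
    simp only [List.foldl_cons]
    refine ih _ ?_ (fun x hx hc => h x (List.mem_cons_of_mem _ hx) hc)
    split
    · exact le_min h0 (h y (List.mem_cons_self ..) (by assumption))
    · exact h0

theorem foldlMinIf_cases {β : Type} (l : List β) (c : β → Bool) (f : β → Int) (init : Int) :
    l.foldl (fun acc x => if c x then min acc (f x) else acc) init = init ∨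
      ∃ x ∈ l, c x = true ∧
        l.foldl (fun acc x => if c x then min acc (f x) else acc) init = f x := by
  induction l generalizing init with
  | nil => left; rfl
  | cons y t ih =>
    simp only [List.foldl_cons]
    by_cases hc : c y = true
    · rcases ih (if c y = true then min init (f y) else init) with h | ⟨x, hx, hcx, h⟩
      · rw [h, hc, if_pos rfl]
        rcases min_choice init (f y) with hm | hm
        · left; exact hm
        · right; exact ⟨y, List.mem_cons_self .., hc, hm⟩
      · right; exact ⟨x, List.mem_cons_of_mem _ hx, hcx, h⟩
    · simp only [hc, if_false, Bool.false_eq_true] at *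
      rcases ih init with h | ⟨x, hx, hcx, h⟩
      · left; exact h
      · right; exact ⟨x, List.mem_cons_of_mem _ hx, hcx, h⟩

-- unguarded variants (A's inner loop has no `if`)
theorem foldlMin_le_mem {β : Type} (l : List β) (f : β → Int) (init : Int)
    (x : β) (hx : x ∈ l) :
    l.foldl (fun acc x => min acc (f x)) init ≤ f x := by
  have := foldlMinIf_le_mem l (fun _ => true) f x rfl init hx
  simpa using this

theorem foldlMin_ge {β : Type} (l : List β) (f : β → Int) (init v : Int)
    (h0 : v ≤ init) (h : ∀ x ∈ l, v ≤ f x) :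
    v ≤ l.foldl (fun acc x => min acc (f x)) init := by
  have := foldlMinIf_ge l (fun _ => true) f v init h0 (fun x hx _ => h x hx)
  simpa using this

-- valid last segment [s, j] (0-indexed, inclusive): singleton, or endpoint gcd > 1
def okb (nums : List Int) (s j : Nat) : Bool :=
  s == j || decide (1 < pygcd (nums.getD s 0) (nums.getD j 0))

theorem Bst_dec1 {i j : Nat} (h : ¬j ≤ i) : j - 1 - i < j - i := by omega

theorem Bst_dec2 {i j : Nat} (s : {x // x ∈ List.range' i (j - 1 - i)}) : s.1 - i < j - i := by
  have := List.mem_range'_1.mp s.2; omega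

-- the mathematical optimum: Bst nums i j = min #segments partitioning nums[i:j]
-- (half-open), choosing the LAST segment [s, j-1]
def Bst (nums : List Int) (i j : Nat) : Int :=
  if j ≤ i then 0
  else
    (List.range' i (j - 1 - i)).attach.foldl
      (fun acc s => if okb nums s.1 (j - 1) then min acc (Bst nums i s.1 + 1) else acc)
      (Bst nums i (j - 1) + 1)
termination_by j - i
decreasing_by
  · exact Bst_dec2 s
  · exact Bst_dec1 (by assumption)

theorem Bst_eq (nums : List Int) (i j : Nat) (hij : i < j) :
    Bst nums i j =
      (List.range' i (j - 1 - i)).foldl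
        (fun acc s => if okb nums s (j - 1) then min acc (Bst nums i s + 1) else acc)
        (Bst nums i (j - 1) + 1) := by
  rw [Bst, if_neg (by omega),
    foldl_attach' (List.range' i (j - 1 - i))
      (fun acc s => if okb nums s (j - 1) then min acc (Bst nums i s + 1) else acc)]

theorem Bst_self (nums : List Int) (i : Nat) : Bst nums i i = 0 := by
  rw [Bst, if_pos le_rfl]

theorem Bst_nonneg (nums : List Int) (i j : Nat) : 0 ≤ Bst nums i j := by
  by_cases h : j ≤ i
  · rw [Bst, if_pos h]
  · rw [Bst_eq nums i j (by omega)]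
    refine foldlMinIf_ge _ _ _ _ _ ?_ ?_
    · have := Bst_nonneg nums i (j - 1); omega
    · intro s hs _; have := Bst_nonneg nums i s; omega
termination_by j - i
decreasing_by
  all_goals
    first
      | (have := List.mem_range'_1.mp hs; omega)
      | omega

theorem Bst_pos (nums : List Int) (i j : Nat) (hij : i < j) : 1 ≤ Bst nums i j := by
  rw [Bst_eq nums i j hij]
  refine foldlMinIf_ge _ _ _ _ _ ?_ ?_
  · have := Bst_nonneg nums i (j - 1); omega
  · intro s _ _; have := Bst_nonneg nums i s; omega

theorem Bst_le_len (nums : List Int) (i j : Nat) (hij : i ≤ j) :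
    Bst nums i j ≤ (j : Int) - (i : Int) := by
  by_cases h : j ≤ i
  · rw [Bst, if_pos h]; omega
  · rw [Bst_eq nums i j (by omega)]
    refine le_trans (foldlMinIf_le_init ..) ?_
    have h1 := Bst_le_len nums i (j - 1) (by omega)
    have h2 : ((j - 1 : Nat) : Int) = (j : Int) - 1 := by omega
    omega
termination_by j - i

theorem Bst_le_cand (nums : List Int) (i s j : Nat) (his : i ≤ s) (hsj : s < j)
    (hok : okb nums s (j - 1) = true) :
    Bst nums i j ≤ Bst nums i s + 1 := by
  rw [Bst_eq nums i j (by omega)]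
  by_cases hs : s = j - 1
  · subst hs
    exact foldlMinIf_le_init ..
  · exact foldlMinIf_le_mem _ _ _ s hok _ (List.mem_range'_1.mpr (by omega))

theorem Bst_ach (nums : List Int) (i j : Nat) (hij : i < j) :
    ∃ s, i ≤ s ∧ s < j ∧ okb nums s (j - 1) = true ∧
      Bst nums i j = Bst nums i s + 1 := by
  rw [Bst_eq nums i j hij]
  rcases foldlMinIf_cases (List.range' i (j - 1 - i)) (fun s => okb nums s (j - 1))
      (fun s => Bst nums i s + 1) (Bst nums i (j - 1) + 1) with h | ⟨s, hs, hok, h⟩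
  · exact ⟨j - 1, by omega, by omega, by simp [okb], h⟩
  · have := List.mem_range'_1.mp hs
    exact ⟨s, by omega, by omega, hok, h⟩

theorem Bst_subadd (nums : List Int) (i m j : Nat) (him : i ≤ m) (hmj : m ≤ j) :
    Bst nums i j ≤ Bst nums i m + Bst nums m j := by
  by_cases h : m = j
  · subst h
    rw [Bst_self]
    simp
  · obtain ⟨s, hms, hsj, hok, hach⟩ := Bst_ach nums m j (by omega)
    have h1 : Bst nums i j ≤ Bst nums i s + 1 := Bst_le_cand nums i s j (by omega) hsj hok
    have h2 : Bst nums i s ≤ Bst nums i m + Bst nums m s := Bst_subadd nums i m s him hms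
    omega
termination_by j - m
decreasing_by omega

theorem Bst_ok_one (nums : List Int) (s j : Nat) (hsj : s ≤ j) (hok : okb nums s j = true) :
    Bst nums s (j + 1) = 1 := by
  have h1 : 1 ≤ Bst nums s (j + 1) := Bst_pos nums s (j + 1) (by omega)
  have h2 : Bst nums s (j + 1) ≤ Bst nums s s + 1 :=
    Bst_le_cand nums s s (j + 1) le_rfl (by omega) (by simpa using hok)
  rw [Bst_self] at h2
  omega

theorem okb_of_gcd (nums : List Int) (s j : Nat)
    (h : 1 < pygcd (nums.getD s 0) (nums.getD j 0)) : okb nums s j = true := by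
  simp only [okb, Bool.or_eq_true, decide_eq_true_eq]
  exact Or.inr h

-- dfs(i, j) computes exactly Bst over the closed interval [i, j]
theorem dfsA_eq_Bst (nums : List Int) (i j : Nat) :
    dfsA nums i j = Bst nums i (j + 1) := by
  by_cases hji : j < i
  · rw [dfsA, if_pos hji, Bst, if_pos (by omega)]
  · by_cases hg : 1 < pygcd (nums.getD i 0) (nums.getD j 0)
    · rw [dfsA, if_neg hji, if_pos hg]
      exact (Bst_ok_one nums i j (by omega) (okb_of_gcd nums i j hg)).symm
    · rw [dfsA, if_neg hji, if_neg hg,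
        foldl_attach' (List.range' i (j - i))
          (fun res p => min res (dfsA nums i p + dfsA nums (p + 1) j))]
      refine le_antisymm ?_ ?_
      · -- dfs's minimum reaches Bst's optimal last-segment split
        obtain ⟨s, his, hsj, hok, hach⟩ := Bst_ach nums i (j + 1) (by omega)
        simp only [Nat.add_sub_cancel] at hok hach
        by_cases hsi : s = i
        · have hij2 : i = j := by
            rcases (Bool.or_eq_true ..).mp hok with h | h
            · have : s = j := beq_iff_eq.mp h
              omega
            · rw [hsi] at h; exact absurd (of_decide_eq_true h) hg
          have hz : j - i = 0 := by omega
          rw [hz]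
          simp only [List.range'_zero, List.foldl_nil]
          rw [hach, hsi, Bst_self]
          omega
        · have hmem : s - 1 ∈ List.range' i (j - i) := List.mem_range'_1.mpr (by omega)
          refine le_trans (foldlMin_le_mem _ _ _ (s - 1) hmem) ?_
          rw [dfsA_eq_Bst nums i (s - 1), dfsA_eq_Bst nums (s - 1 + 1) j]
          have hs1 : s - 1 + 1 = s := by omega
          rw [hs1, Bst_ok_one nums s j (by omega) hok, hach]
      · -- Bst is a lower bound on every dfs candidate
        refine foldlMin_ge _ _ _ _ ?_ ?_
        · have := Bst_le_len nums i (j + 1) (by omega)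
          push_cast at this ⊢
          omega
        · intro p hp
          have hpb := List.mem_range'_1.mp hp
          rw [dfsA_eq_Bst nums i p, dfsA_eq_Bst nums (p + 1) j]
          have := Bst_subadd nums i (p + 1) (j + 1) (by omega) (by omega)
          omega
termination_by j + 1 - i
decreasing_by
  all_goals
    first
      | (have := List.mem_range'_1.mp hmem; omega)
      | (have := List.mem_range'_1.mp hp; omega)

theorem getD_replicate_zero (n i : Nat) : (List.replicate n (0 : Int)).getD i 0 = 0 := by
  simp only [List.getD, List.getElem?_replicate]
  split <;> simp

-- proof-side name for B's outer-loop body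
def altStep (nums : List Int) (dp : List Int) (j : Nat) : List Int :=
  dp.set j
    ((List.range (j - 1)).foldl
      (fun best i =>
        if 1 < pygcd (nums.getD i 0) (nums.getD (j - 1) 0) then
          min best (dp.getD i 0 + 1)
        else best)
      (dp.getD (j - 1) 0 + 1))

theorem alt_eq_foldl (nums : List Int) :
    splitArray2_alt nums =
      ((List.range' 1 nums.length).foldl (altStep nums)
        (List.replicate (nums.length + 1) (0 : Int))).getD nums.length 0 := by
  rfl

-- invariant of B's outer loop: after processing j = 1..m, dp has length n+1 and dp[k] = Bst 0 k for k ≤ m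
theorem alt_loop_inv (nums : List Int) (m : Nat) (hm : m ≤ nums.length) :
    ((List.range' 1 m).foldl (altStep nums)
        (List.replicate (nums.length + 1) (0 : Int))).length = nums.length + 1 ∧
    ∀ k ≤ m,
      ((List.range' 1 m).foldl (altStep nums)
          (List.replicate (nums.length + 1) (0 : Int))).getD k 0 = Bst nums 0 k := by
  induction m with
  | zero =>
    refine ⟨by simp, ?_⟩
    intro k hk
    interval_cases k
    rw [Bst_self]
    exact getD_replicate_zero _ _
  | succ m ih =>
    obtain ⟨ihlen, ihv⟩ := ih (by omega)
    rw [List.range'_concat, List.foldl_append, List.foldl_cons, List.foldl_nil]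
    have hnorm : 1 + 1 * m = m + 1 := by omega
    rw [hnorm]
    set dp := (List.range' 1 m).foldl (altStep nums)
        (List.replicate (nums.length + 1) (0 : Int)) with hdp
    have hbest :
        (List.range m).foldl
            (fun best i =>
              if 1 < pygcd (nums.getD i 0) (nums.getD m 0) then
                min best (dp.getD i 0 + 1)
              else best)
            (dp.getD m 0 + 1) = Bst nums 0 (m + 1) := by
      rw [Bst_eq nums 0 (m + 1) (by omega)]
      simp only [Nat.add_sub_cancel, Nat.sub_zero]
      rw [List.range_eq_range', ihv m (by omega)]
      refine PySem.List.foldl_congr_mem _ _ _ _ ?_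
      intro acc s hs
      have hsb := List.mem_range'_1.mp hs
      have hne : (s == m) = false := by
        simp only [beq_eq_false_iff_ne, ne_eq]
        omega
      have hok : okb nums s m = decide (1 < pygcd (nums.getD s 0) (nums.getD m 0)) := by
        simp [okb, hne]
      rw [hok, ihv s (by omega)]
      by_cases hd : 1 < pygcd (nums.getD s 0) (nums.getD m 0)
      · simp
      · simp
    constructor
    · rw [altStep]
      simpa using ihlen
    · intro k hk
      rw [altStep]
      simp only [Nat.add_sub_cancel]
      rw [hbest]
      by_cases hkm : k = m + 1
      · subst hkm
        rw [List.getD, List.getElem?_set_self (by omega)]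
        rfl
      · rw [List.getD, List.getElem?_set_ne (by omega)]
        exact ihv k (by omega)

theorem alt_eq_Bst (nums : List Int) : splitArray2_alt nums = Bst nums 0 nums.length := by
  rw [alt_eq_foldl]
  exact (alt_loop_inv nums nums.length le_rfl).2 nums.length le_rfl

theorem a_eq_Bst (nums : List Int) : splitArray2 nums = Bst nums 0 nums.length := by
  rw [splitArray2]
  by_cases h : nums.length = 0
  · rw [if_pos h, h, Bst_self]
  · rw [if_neg h, dfsA_eq_Bst]
    congr 1
    omega

-- ===== VERDICT (by name: the statement is the Claim_ definition above) =====
theorem splitArray2_spec : Claim_equal_splitArray2 := by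
  intro nums _
  unfold Spec_splitArray2
  rw [a_eq_Bst, alt_eq_Bst]
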